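-- pv_equiv track=rewrite | github.com/KGene1901/Computation-Thinking-Yr1 | Error-Correcting Code/error_correcting_code_tgkh12.py | hammingEncoder
-- ===== SOURCE A (Python) =====
-- def decimalToVector(i,l):
--     bit_seq = [0]*l # initialising vector
--
--     if i == 0:
--         return bit_seq  # trivial as binary of 0 will always be 0 regardless of how many digits
--
--     else:
--         for x in range(0,len(bit_seq)):
--             if (i-(2**(l-1)))<0:    # if number is less than 2^(l-1) then move to the next position
--                 l-=1
--             else:
--                 bit_seq[x]=1
--                 i-=(2**(l-1))
--                 l-=1
--
--     return bit_seq
--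
-- def hammingGeneratorMatrix(r):
--     n = 2**r-1
--
--     #construct permutation pi
--     pi = []
--     for i in range(r):
--         pi.append(2**(r-i-1))
--     for j in range(1,r):
--         for k in range(2**j+1,2**(j+1)):
--             pi.append(k)
--
--     #construct rho = pi^(-1)
--     rho = []
--     for i in range(n):
--         rho.append(pi.index(i+1))
--
--     #construct H'
--     H = []
--     for i in range(r,n):
--         H.append(decimalToVector(pi[i],r))
--
--     #construct G'
--     GG = [list(i) for i in zip(*H)]
--     for i in range(n-r):
--         GG.append(decimalToVector(2**(n-r-i-1),n-r))
--
--     #apply rho to get Gtranpose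
--     G = []
--     for i in range(n):
--         G.append(GG[rho[i]])
--
--     #transpose
--     G = [list(i) for i in zip(*G)]
--
--     return G
--
-- def hammingEncoder(m):
--     r = 2
--
--     while ((2**r)-r-1)<len(m):  # line 124-130 are input error checking to ensure that the input vector is of length (2**r)-r-1
--         r+=1
--     else:
--         if ((2**r)-r-1)==len(m):
--             pass
--         else:
--             return []
--
--     Gmatrix = hammingGeneratorMatrix(r) # creates generator matrix for calculated r from the error checking
--     resultMatrix = [0]*len(Gmatrix[0])  # initialising codework matrix
--     pos=0
--
--     for i in range (len(Gmatrix[0])):   # lines 136-145 are for the multiplication of the message with the generator matrix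
--         total = 0
--         for j in range (len(Gmatrix)):
--
--             total = total + ((m[j])*(Gmatrix[j][i]))
--             if total>1:
--                 total=0
--
--         resultMatrix[pos] = total
--         pos+=1
--
--     return resultMatrix
-- ===== SOURCE B (Python) =====
-- def hammingEncoder(m):
--     # systematic Hamming encoder: no generator matrix; message entries sit at the
--     # non-power-of-two positions, each parity position 2^a accumulates the message
--     # entries whose position has bit a set (same >1 -> 0 accumulator as A).
--     k = len(m)
--     r = 2
--     while (2 ** r) - r - 1 < k:
--         r += 1
--     if (2 ** r) - r - 1 != k:
--         return []
--     n = 2 ** r - 1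
--     # first pass: positions of the message entries (the non-powers of two)
--     pos = []
--     a = 0
--     for p in range(1, n + 1):
--         if p == 1 << a:
--             a += 1
--         else:
--             pos.append(p)
--     # second pass: build the codeword position by position
--     out = []
--     a = 0
--     for p in range(1, n + 1):
--         if p == 1 << a:
--             t = 0
--             for j in range(k):
--                 if (pos[j] >> a) & 1 != 0:
--                     t += m[j]
--                     if t > 1:
--                         t = 0
--             out.append(t)
--             a += 1
--         else:
--             # a parity positions precede p, so p carries message entry p - 1 - a
--             t = m[p - 1 - a]
--             out.append(0 if t > 1 else t)
--     return out
-- ===== Notes on version B (the rewrite author's own statement) =====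
-- stated objective: alternative
-- what changed: Instead of building the Hamming generator matrix via permutation/index/transposes and doing a full k-by-n matrix multiply, B writes the codeword position by position: non-power-of-two positions carry the message entry directly (rank tracked by a power counter) and each parity position 2^a folds only the message entries whose position has bit a set, with the same >1-resets-to-0 accumulator.
import Mathlib
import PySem

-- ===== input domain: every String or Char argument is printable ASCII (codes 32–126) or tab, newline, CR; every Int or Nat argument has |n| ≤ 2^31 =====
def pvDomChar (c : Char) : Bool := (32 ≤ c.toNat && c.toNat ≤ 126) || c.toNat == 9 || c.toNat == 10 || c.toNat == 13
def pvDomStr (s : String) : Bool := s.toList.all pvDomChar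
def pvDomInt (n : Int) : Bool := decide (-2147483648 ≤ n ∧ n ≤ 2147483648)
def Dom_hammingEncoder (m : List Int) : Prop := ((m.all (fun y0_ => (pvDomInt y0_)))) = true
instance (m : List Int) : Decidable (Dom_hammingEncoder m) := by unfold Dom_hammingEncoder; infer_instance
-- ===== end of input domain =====

-- B replaces A's generator-matrix construction and full matrix multiply by a direct
-- systematic per-position encoder; return values proved equal on every input.

-- ===== PORT A =====
-- termination fact for the r-search loop (cited by findR_A/findR_B's decreasing_by)
theorem pvTwoMulLe (r : Nat) : 2 * r ≤ 2 ^ r := by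
  induction r with
  | zero => simp
  | succ k ih =>
    have h1 : k = 0 ∨ 2 ≤ 2 ^ k := by
      cases k with
      | zero => exact Or.inl rfl
      | succ j =>
        refine Or.inr ?_
        have : 2 ^ 1 ≤ 2 ^ (j + 1) := Nat.pow_le_pow_right (by norm_num) (by omega)
        simpa using this
    have h2 : 2 ^ (k + 1) = 2 ^ k + 2 ^ k := by ring
    rcases h1 with h | h
    · subst h; norm_num
    · omega

-- the loop of decimalToVector (for x in range(0, len(bit_seq)) …), state (bit_seq, i, l),
-- x = write position, rem = iterations left; 2**(l-1) ported via (l-1).toNat (exponent is ≥ 0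
-- in every reachable state)
def dtvLoop : List Int → Int → Int → Nat → Nat → List Int
  | bs, _, _, _, 0 => bs
  | bs, i, l, x, rem+1 =>
    if i - 2 ^ (l - 1).toNat < 0 then dtvLoop bs i (l - 1) (x + 1) rem
    else dtvLoop (bs.set x 1) (i - 2 ^ (l - 1).toNat) (l - 1) (x + 1) rem

def decimalToVector (i : Int) (l : Nat) : List Int :=
  let bs : List Int := List.replicate l 0      -- [0]*l
  if i = 0 then bs
  else dtvLoop bs i (l : Int) 0 bs.length

-- width of zip(*rows): the shortest row (rows here are always nonempty and uniform);
-- row.getD is only read below that width, so the default is never taken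
def pyZipStar (rows : List (List Int)) : List (List Int) :=
  match rows with
  | [] => []
  | r0 :: _ =>
    (List.range (rows.foldl (fun a l => min a l.length) r0.length)).map
      (fun i => rows.map (fun row => row.getD i 0))

-- all Python ints in this helper are nonnegative, and every Nat subtraction below is in
-- range, so the loops are ported over Nat ranges (range(a,b) = List.range' a (b-a))
def hammingGeneratorMatrix (r : Nat) : List (List Int) :=
  let n := 2 ^ r - 1
  -- construct permutation pi
  let pi0 := (List.range r).foldl (fun acc i => acc ++ [2 ^ (r - i - 1)]) ([] : List Nat)
  let pi := (List.range' 1 (r - 1)).foldl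
      (fun acc j => (List.range' (2 ^ j + 1) (2 ^ (j + 1) - (2 ^ j + 1))).foldl
        (fun acc2 k => acc2 ++ [k]) acc) pi0
  -- construct rho = pi^(-1); pi.index(i+1) always succeeds, so the getD default is never taken
  let rho := (List.range n).foldl (fun acc i => acc ++ [(PySem.List.index? pi (i + 1)).getD 0]) ([] : List Nat)
  -- construct H'
  let H := (List.range' r (n - r)).foldl
      (fun acc i => acc ++ [decimalToVector ((pi.getD i 0 : Nat) : Int) r]) ([] : List (List Int))
  -- construct G'
  let GG := pyZipStar H
  let GG := (List.range (n - r)).foldl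
      (fun acc i => acc ++ [decimalToVector ((2 ^ (n - r - i - 1) : Nat) : Int) (n - r)]) GG
  -- apply rho to get Gtranspose; rho entries are in range, defaults never taken
  let G := (List.range n).foldl (fun acc i => acc ++ [GG.getD (rho.getD i 0) []]) ([] : List (List Int))
  -- transpose
  pyZipStar G

-- while ((2**r)-r-1) < len(m): r += 1   (values are nonnegative, compared over Nat)
def findR_A (k r : Nat) : Nat :=
  if 2 ^ r - r - 1 < k then findR_A k (r + 1) else r
termination_by k + 1 - r
decreasing_by
  have h := pvTwoMulLe r
  have h2 : r < 2 ^ r := Nat.lt_two_pow_self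
  omega

def hammingEncoder (m : List Int) : List Int :=
  let r := findR_A m.length 2
  if 2 ^ r - r - 1 = m.length then
    let G := hammingGeneratorMatrix r
    -- len(Gmatrix[0]): G is never empty here; m[j] and G[j][i] are always in range,
    -- so Python-raising indexing is unreachable and getD defaults are never taken
    let w := (G.getD 0 []).length
    ((List.range w).foldl
      (fun (st : List Int × Nat) i =>
        let total := (List.range G.length).foldl
          (fun t j =>
            let t := t + m.getD j 0 * ((G.getD j []).getD i 0)
            if t > 1 then 0 else t) 0
        (st.1.set st.2 total, st.2 + 1))
      (List.replicate w 0, 0)).1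
  else []

-- ===== PORT B =====
def findR_B (k r : Nat) : Nat :=
  if 2 ^ r - r - 1 < k then findR_B k (r + 1) else r
termination_by k + 1 - r
decreasing_by
  have h := pvTwoMulLe r
  have h2 : r < 2 ^ r := Nat.lt_two_pow_self
  omega

-- all loop variables are nonnegative Python ints, ported over Nat ranges; every index
-- (p - 1 - a, j) is in range, so getD defaults are never taken
def hammingEncoder_alt (m : List Int) : List Int :=
  let k := m.length
  let r := findR_B k 2
  if 2 ^ r - r - 1 = k then
    let n := 2 ^ r - 1
    -- first pass: positions of the message entries (the non-powers of two)
    let pos := ((List.range' 1 n).foldl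
        (fun (st : List Nat × Nat) p =>
          if p = 1 <<< st.2 then (st.1, st.2 + 1) else (st.1 ++ [p], st.2)) ([], 0)).1
    -- second pass: parity at 2^a folds the entries whose position has bit a set
    ((List.range' 1 n).foldl
      (fun (st : List Int × Nat) p =>
        if p = 1 <<< st.2 then
          let t := (List.range k).foldl
            (fun t j =>
              if (pos.getD j 0) >>> st.2 &&& 1 ≠ 0 then
                let t := t + m.getD j 0
                if t > 1 then 0 else t
              else t) 0
          (st.1 ++ [t], st.2 + 1)
        else
          let t := m.getD (p - 1 - st.2) 0
          (st.1 ++ [if t > 1 then 0 else t], st.2)) ([], 0)).1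
  else []

-- ===== PRECONDITION & SPEC =====
def Spec_hammingEncoder (m : List Int) (out : List Int) : Prop := out = hammingEncoder_alt m
instance (m : List Int) (out : List Int) : Decidable (Spec_hammingEncoder m out) := by unfold Spec_hammingEncoder; infer_instance

-- ===== CLAIM (what is proved, stated in full; the proofs are below) =====
def Claim_equal_hammingEncoder : Prop := ∀ (m : List Int), Dom_hammingEncoder m → Spec_hammingEncoder m (hammingEncoder m)

-- ===== LEMMAS AND PROOFS =====

-- ---- spec-side vocabulary ----

-- A's accumulator step: add, then reset to 0 when the running total exceeds 1
def clampI (t : Int) : Int := if t > 1 then 0 else t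

-- the non-power-of-two positions 1..2^r-1, in increasing order, grouped in blocks (2^j, 2^(j+1))
def npBlocks (r : Nat) : List Nat :=
  (List.range' 1 (r - 1)).flatMap (fun j => List.range' (2 ^ j + 1) (2 ^ j - 1))

-- the parity value at position 2^a: fold the message entries whose position has bit a set
def parityV (r : Nat) (m : List Int) (a : Nat) : Int :=
  (List.range (2 ^ r - r - 1)).foldl
    (fun t j => if Nat.testBit ((npBlocks r).getD j 0) a then clampI (t + m.getD j 0) else t) 0

-- the codeword entry at position p
def colval (r : Nat) (m : List Int) (p : Nat) : Int :=
  if p = 2 ^ Nat.log2 p then parityV r m (Nat.log2 p)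
  else clampI (m.getD (p - 2 - Nat.log2 p) 0)

def outSpec (r : Nat) (m : List Int) : List Int := (List.range' 1 (2 ^ r - 1)).map (colval r m)

-- MSB-first binary digits, mirroring decimalToVector's loop
def bitsMSB (i : Int) : Nat → List Int
  | 0 => []
  | rem+1 => if i - 2 ^ rem < 0 then 0 :: bitsMSB i rem else 1 :: bitsMSB (i - 2 ^ rem) rem

-- entry of A's generator matrix at message row j, position p
def colE (r j p : Nat) : Int :=
  if p = 2 ^ Nat.log2 p then (if Nat.testBit ((npBlocks r).getD j 0) (Nat.log2 p) then 1 else 0)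
  else (if p - 2 - Nat.log2 p = j then 1 else 0)

-- ---- generic lemmas ----

theorem findR_eq (k r : Nat) : findR_B k r = findR_A k r := by
  fun_induction findR_B k r with
  | case1 r hlt ih => rw [findR_A, if_pos hlt]; exact ih
  | case2 r hlt => rw [findR_A, if_neg hlt]

theorem findR_ge (k r : Nat) : r ≤ findR_A k r := by
  fun_induction findR_A k r with
  | case1 r hlt ih => omega
  | case2 r hlt => omega

theorem bitsMSB_length (i : Int) (rem : Nat) : (bitsMSB i rem).length = rem := by
  induction rem generalizing i with
  | zero => rfl
  | succ n ih => unfold bitsMSB; split <;> simp [ih]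

theorem bitsMSB_zero (rem : Nat) : bitsMSB 0 rem = List.replicate rem 0 := by
  induction rem with
  | zero => rfl
  | succ n ih =>
    unfold bitsMSB
    rw [if_pos (by simp), ih, List.replicate_succ]

theorem dtvLoop_eq (rem : Nat) (front : List Int) (i : Int) :
    dtvLoop (front ++ List.replicate rem 0) i (rem : Int) front.length rem = front ++ bitsMSB i rem := by
  induction rem generalizing front i with
  | zero => simp [dtvLoop, bitsMSB]
  | succ n ih =>
    unfold dtvLoop bitsMSB
    rw [List.replicate_succ]
    have hsplit : front ++ (0 : Int) :: List.replicate n 0 = (front ++ [0]) ++ List.replicate n 0 := by simp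
    have hcast : ((((n + 1 : Nat)) : Int) - 1).toNat = n := by omega
    rw [hcast]
    have h1 : (((n + 1 : Nat)) : Int) - 1 = (n : Int) := by omega
    rw [h1]
    split
    · -- bit is 0
      rw [hsplit]
      have h2 : front.length + 1 = (front ++ [(0 : Int)]).length := by simp
      rw [h2, ih (front ++ [0]) i]
      simp
    · -- bit is 1
      have hset : (front ++ (0 : Int) :: List.replicate n 0).set front.length 1
          = (front ++ [1]) ++ List.replicate n 0 := by
        rw [List.set_append]
        simp
      have h2 : front.length + 1 = (front ++ [(1 : Int)]).length := by simp
      rw [hset, h2, ih (front ++ [1]) (i - 2 ^ n)]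
      simp

theorem dtv_eq (i : Int) (l : Nat) : decimalToVector i l = bitsMSB i l := by
  unfold decimalToVector
  split
  · subst i; rw [bitsMSB_zero]
  · have := dtvLoop_eq l [] i
    simpa using this

theorem testBit_top (q rem : Nat) (h : q < 2 ^ (rem + 1)) :
    Nat.testBit q rem = decide (2 ^ rem ≤ q) := by
  rw [Nat.testBit_eq_decide_div_mod_eq]
  have hp : 0 < 2 ^ rem := Nat.pow_pos (by norm_num)
  have h2 : q / 2 ^ rem < 2 := by
    rw [Nat.div_lt_iff_lt_mul hp]
    calc q < 2 ^ (rem + 1) := h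
    _ = 2 * 2 ^ rem := by ring
  by_cases hle : 2 ^ rem ≤ q
  · have h1 : 1 ≤ q / 2 ^ rem := by
      rw [Nat.le_div_iff_mul_le hp]; omega
    simp [hle]; omega
  · have h0 : q / 2 ^ rem = 0 := Nat.div_eq_of_lt (by omega)
    simp [hle, h0]

theorem bits_getD (rem : Nat) : ∀ (q t : Nat), q < 2 ^ rem → t < rem →
    (bitsMSB (q : Int) rem).getD t 0 = if Nat.testBit q (rem - 1 - t) then 1 else 0 := by
  induction rem with
  | zero => intro q t _ ht; omega
  | succ n ih =>
    intro q t hq ht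
    have hcast : ((2 : Int) ^ n) = ((2 ^ n : Nat) : Int) := by push_cast; ring
    unfold bitsMSB
    by_cases hlt : q < 2 ^ n
    · rw [if_pos (by rw [hcast]; omega)]
      cases t with
      | zero =>
        have := testBit_top q n hq
        simp only [List.getD_cons_zero, Nat.add_sub_cancel, Nat.sub_zero, this]
        simp [Nat.not_le.mpr hlt]
      | succ t' =>
        have h1 : n + 1 - 1 - (t' + 1) = n - 1 - t' := by omega
        simp only [List.getD_cons_succ, h1]
        exact ih q t' hlt (by omega)
    · rw [if_neg (by rw [hcast]; omega)]
      have hsub : (q : Int) - 2 ^ n = ((q - 2 ^ n : Nat) : Int) := by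
        rw [hcast]; omega
      rw [hsub]
      cases t with
      | zero =>
        have := testBit_top q n hq
        simp only [List.getD_cons_zero, Nat.add_sub_cancel, Nat.sub_zero, this]
        simp [Nat.not_lt.mp hlt]
      | succ t' =>
        have h1 : n + 1 - 1 - (t' + 1) = n - 1 - t' := by omega
        simp only [List.getD_cons_succ, h1]
        rw [ih (q - 2 ^ n) t' (by omega) (by omega)]
        have hq' : q = 2 ^ n + (q - 2 ^ n) := by omega
        have htb : Nat.testBit q (n - 1 - t') = Nat.testBit (q - 2 ^ n) (n - 1 - t') := by
          conv_lhs => rw [hq']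
          exact Nat.testBit_two_pow_add_gt (by omega) _
        rw [htb]

theorem log2_spec (j q : Nat) (h1 : 2 ^ j ≤ q) (h2 : q < 2 ^ (j + 1)) : Nat.log2 q = j := by
  rw [Nat.log2_eq_log_two]; exact Nat.log_eq_of_pow_le_of_lt_pow h1 h2

theorem npBlocks_succ (r : Nat) (h : 1 ≤ r) :
    npBlocks (r + 1) = npBlocks r ++ List.range' (2 ^ r + 1) (2 ^ r - 1) := by
  unfold npBlocks
  have h1 : r + 1 - 1 = (r - 1) + 1 := by omega
  rw [h1, List.range'_concat]
  have h2 : 1 + 1 * (r - 1) = r := by omega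
  rw [h2, List.flatMap_append]
  simp

theorem npBlocks_length (r : Nat) : (npBlocks r).length = 2 ^ r - r - 1 := by
  induction r with
  | zero => simp [npBlocks]
  | succ n ih =>
    cases Nat.eq_zero_or_pos n with
    | inl h0 => subst h0; simp [npBlocks]
    | inr hpos =>
      rw [npBlocks_succ n hpos]
      have h1 : n < 2 ^ n := Nat.lt_two_pow_self
      have h2 : 2 ^ (n + 1) = 2 ^ n + 2 ^ n := by ring
      simp [ih, h2]
      omega

theorem npBlocks_mem (r q : Nat) (h : q ∈ npBlocks r) :
    3 ≤ q ∧ q < 2 ^ r ∧ 2 ^ Nat.log2 q < q := by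
  unfold npBlocks at h
  rw [List.mem_flatMap] at h
  obtain ⟨j, hj, hq⟩ := h
  rw [List.mem_range'_1] at hj hq
  have hj1 : 1 ≤ j ∧ j < r := by omega
  have h2j : 2 ≤ 2 ^ j := by
    calc 2 = 2 ^ 1 := rfl
    _ ≤ 2 ^ j := Nat.pow_le_pow_right (by norm_num) hj1.1
  have hmono : 2 ^ (j + 1) ≤ 2 ^ r := Nat.pow_le_pow_right (by norm_num) (by omega)
  have hpow : 2 ^ (j + 1) = 2 ^ j + 2 ^ j := by ring
  have hlog : Nat.log2 q = j := log2_spec j q (by omega) (by omega)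
  refine ⟨by omega, by omega, by rw [hlog]; omega⟩

theorem npBlocks_mem_of (r p : Nat) (h1 : 1 ≤ p) (h2 : p < 2 ^ r) (h3 : p ≠ 2 ^ Nat.log2 p) :
    p ∈ npBlocks r := by
  induction r with
  | zero => simp at h2; omega
  | succ n ih =>
    have hn1 : 1 ≤ n := by
      by_contra hn
      have : n = 0 := by omega
      subst this
      interval_cases p
      · exact h3 (by decide)
    by_cases hlt : p < 2 ^ n
    · rw [npBlocks_succ n hn1]
      exact List.mem_append_left _ (ih hlt)
    · rw [npBlocks_succ n hn1]
      refine List.mem_append_right _ ?_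
      rw [List.mem_range'_1]
      have hlog : Nat.log2 p = n := log2_spec n p (by omega) h2
      have : p ≠ 2 ^ n := by rw [hlog] at h3; exact h3
      omega

theorem npBlocks_getElem_rank (r q : Nat) (h : q ∈ npBlocks r) :
    (npBlocks r)[q - 2 - Nat.log2 q]? = some q := by
  induction r with
  | zero => simp [npBlocks] at h
  | succ n ih =>
    by_cases hn1 : 1 ≤ n
    · rw [npBlocks_succ n hn1] at h ⊢
      rcases List.mem_append.mp h with hold | hnew
      · have := ih hold
        have hlt : q - 2 - Nat.log2 q < (npBlocks n).length :=
          (List.getElem?_eq_some_iff.mp this).1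
        rw [List.getElem?_append_left hlt]
        exact ih hold
      · rw [List.mem_range'_1] at hnew
        have h2n : 2 ≤ 2 ^ n := by
          calc 2 = 2 ^ 1 := rfl
          _ ≤ 2 ^ n := Nat.pow_le_pow_right (by norm_num) hn1
        have hpow : 2 ^ (n + 1) = 2 ^ n + 2 ^ n := by ring
        have hlog : Nat.log2 q = n := log2_spec n q (by omega) (by omega)
        have hlen : (npBlocks n).length = 2 ^ n - n - 1 := npBlocks_length n
        have hnlt : n < 2 ^ n := Nat.lt_two_pow_self
        have hidx : q - 2 - Nat.log2 q = (npBlocks n).length + (q - 2 ^ n - 1) := by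
          rw [hlog, hlen]; omega
        rw [hidx, List.getElem?_append_right (by omega)]
        have : (npBlocks n).length + (q - 2 ^ n - 1) - (npBlocks n).length = q - 2 ^ n - 1 := by omega
        rw [this, List.getElem?_range' (by omega)]
        congr 1
        omega
    · have hn0 : n = 0 ∨ n = 1 := by omega
      rcases hn0 with h0 | h0 <;> subst h0 <;> simp [npBlocks] at h
      · omega

theorem npBlocks_pairwise (r : Nat) : (npBlocks r).Pairwise (· < ·) := by
  induction r with
  | zero => simp [npBlocks]
  | succ n ih =>
    by_cases hn1 : 1 ≤ n
    · rw [npBlocks_succ n hn1]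
      rw [List.pairwise_append]
      refine ⟨ih, List.pairwise_lt_range' 1 (by norm_num), ?_⟩
      intro a ha b hb
      have h1 := npBlocks_mem n a ha
      rw [List.mem_range'_1] at hb
      omega
    · have hn0 : n = 0 ∨ n = 1 := by omega
      rcases hn0 with h0 | h0 <;> subst h0 <;> simp [npBlocks]

theorem index?_of_getElem? (xs : List Nat) (k q : Nat) (h : xs[k]? = some q)
    (hfst : ∀ j, j < k → xs[j]? ≠ some q) : PySem.List.index? xs q = some k := by
  rw [PySem.List.index?_eq_some_iff]
  obtain ⟨hk, hget⟩ := List.getElem?_eq_some_iff.mp h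
  refine ⟨xs.take k, xs.drop (k + 1), ?_, by simp [Nat.min_eq_left (Nat.le_of_lt hk)], ?_⟩
  · conv_lhs => rw [← List.take_append_drop k xs]
    congr 1
    rw [← hget, List.getElem_cons_drop]
  · intro hmem
    obtain ⟨j, hj, hjq⟩ := List.mem_iff_getElem.mp hmem
    have hjlen : j < k := by
      have := hj
      simp [Nat.min_eq_left (Nat.le_of_lt hk)] at this
      exact this
    apply hfst j hjlen
    rw [List.getElem?_eq_some_iff]
    refine ⟨by omega, ?_⟩
    rw [← hjq, List.getElem_take]

theorem foldl_min_const (w : Nat) : ∀ (l : List (List Int)) (a : Nat), (∀ x ∈ l, x.length = w) →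
    a = w → l.foldl (fun a x => min a x.length) a = w := by
  intro l
  induction l with
  | nil => intro a _ ha; simpa using ha
  | cons x xs ih =>
    intro a hx ha
    simp only [List.foldl_cons]
    exact ih _ (fun y hy => hx y (List.mem_cons_of_mem _ hy))
      (by rw [ha, hx x (List.mem_cons_self)]; omega)

theorem zipStar_uniform (rows : List (List Int)) (w : Nat) (hne : rows ≠ [])
    (hw : ∀ row ∈ rows, row.length = w) :
    pyZipStar rows = (List.range w).map (fun t => rows.map (fun row => row.getD t 0)) := by
  cases rows with
  | nil => exact absurd rfl hne
  | cons r0 rest =>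
    have hmin : ((r0 :: rest).foldl (fun a l => min a l.length) r0.length) = w :=
      foldl_min_const w (r0 :: rest) r0.length (fun y hy => hw y hy) (hw r0 (List.mem_cons_self))
    show (List.range ((r0 :: rest).foldl (fun a l => min a l.length) r0.length)).map
        (fun i => (r0 :: rest).map (fun row => row.getD i 0)) = _
    rw [hmin]

theorem setfold_map (f : Nat → Int) : ∀ (c p : Nat) (done rest : List Int), rest.length = c →
    ((List.range' p c).foldl (fun (st : List Int × Nat) i => (st.1.set st.2 (f i), st.2 + 1))
      (done ++ rest, done.length)).1 = done ++ (List.range' p c).map f := by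
  intro c
  induction c with
  | zero => intro p done rest hr; rw [List.length_eq_zero_iff] at hr; subst hr; simp
  | succ n ih =>
    intro p done rest hr
    match rest, hr with
    | v :: rest', hr' =>
      rw [List.range'_succ, List.foldl_cons, List.map_cons]
      have hset : (done ++ v :: rest').set done.length (f p) = (done ++ [f p]) ++ rest' := by
        rw [List.set_append]
        simp
      have hlen : done.length + 1 = (done ++ [f p]).length := by simp
      rw [hset, hlen]
      have := ih (p + 1) (done ++ [f p]) rest' (by simpa using hr')
      rw [this]
      simp

theorem clampI_le_one (t : Int) : clampI t ≤ 1 := by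
  unfold clampI; split <;> omega

theorem fold_indicator (js : List Nat) (v : Nat → Int) (b : Nat → Bool) :
    ∀ (t : Int), t ≤ 1 →
    js.foldl (fun t j => clampI (t + v j * (if b j then 1 else 0))) t
      = js.foldl (fun t j => if b j then clampI (t + v j) else t) t := by
  induction js with
  | nil => intro t _; rfl
  | cons j js ih =>
    intro t ht
    simp only [List.foldl_cons]
    by_cases hb : b j
    · simp only [hb, if_true, mul_one]
      exact ih _ (clampI_le_one _)
    · have hbf : b j = false := by simpa using hb
      simp only [hbf, Bool.false_eq_true, if_false, mul_zero, add_zero]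
      have hct : clampI t = t := by unfold clampI; rw [if_neg (by omega)]
      rw [hct]
      exact ih _ ht

theorem fold_stay (js : List Nat) (rank : Nat) (v : Nat → Int) :
    ∀ (t : Int), t ≤ 1 → (∀ j ∈ js, rank ≠ j) →
    js.foldl (fun t j => clampI (t + v j * (if rank = j then 1 else 0))) t = t := by
  induction js with
  | nil => intro t _ _; rfl
  | cons j js ih =>
    intro t ht hne
    simp only [List.foldl_cons]
    have hj : rank ≠ j := hne j (List.mem_cons_self)
    have : clampI (t + v j * (if rank = j then 1 else 0)) = t := by
      rw [if_neg hj]; unfold clampI; rw [mul_zero, add_zero, if_neg (by omega)]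
    rw [this]
    exact ih t ht (fun x hx => hne x (List.mem_cons_of_mem _ hx))

theorem fold_unit (K rank : Nat) (v : Nat → Int) (h : rank < K) :
    (List.range K).foldl (fun t j => clampI (t + v j * (if rank = j then 1 else 0))) 0
      = clampI (v rank) := by
  have e2 : List.range' rank (K - rank) = rank :: List.range' (rank + 1) (K - rank - 1) := by
    have h2 : K - rank = (K - rank - 1) + 1 := by omega
    rw [h2, List.range'_succ]
    congr 2
  have e1 : List.range' 0 rank ++ List.range' rank (K - rank) = List.range' 0 K := by
    have := List.range'_append (s := 0) (m := rank) (n := K - rank) (step := 1)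
    simpa [Nat.add_sub_cancel' (Nat.le_of_lt h)] using this
  have hsplit : List.range K = List.range' 0 rank ++ rank :: List.range' (rank + 1) (K - rank - 1) := by
    rw [List.range_eq_range', ← e1, e2]
  rw [hsplit, List.foldl_append, List.foldl_cons]
  rw [fold_stay _ rank v 0 (by omega) (by intro j hj; rw [List.mem_range'_1] at hj; omega)]
  have : clampI (0 + v rank * (if rank = rank then 1 else 0)) = clampI (v rank) := by
    rw [if_pos rfl]; ring_nf
  rw [this]
  exact fold_stay _ rank v _ (clampI_le_one _)
    (by intro j hj; rw [List.mem_range'_1] at hj; omega)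

-- ---- A-side characterization ----

-- the descending powers of two that head A's permutation pi
def powListA (r : Nat) : List Nat := (List.range r).map (fun i => 2 ^ (r - i - 1))

theorem powListA_length (r : Nat) : (powListA r).length = r := by
  simp [powListA]

theorem powListA_getElem? (r t : Nat) (h : t < r) :
    (powListA r)[t]? = some (2 ^ (r - 1 - t)) := by
  unfold powListA
  rw [List.getElem?_map, List.getElem?_range h]
  simp only [Option.map_some, Option.some.injEq]
  congr 1
  omega

theorem log2_lt (r p : Nat) (h1 : 1 ≤ p) (h2 : p < 2 ^ r) : Nat.log2 p < r := by
  have hle : 2 ^ Nat.log2 p ≤ p := Nat.log2_self_le (by omega)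
  have : 2 ^ Nat.log2 p < 2 ^ r := by omega
  exact (Nat.pow_lt_pow_iff_right (by norm_num)).mp this

theorem rank_lt (r q : Nat) (hq : q ∈ npBlocks r) : q - 2 - Nat.log2 q < 2 ^ r - r - 1 := by
  have h := npBlocks_getElem_rank r q hq
  have := (List.getElem?_eq_some_iff.mp h).1
  rwa [npBlocks_length] at this

theorem piIdx_pow (r a : Nat) (ha : a < r) :
    PySem.List.index? (powListA r ++ npBlocks r) (2 ^ a) = some (r - 1 - a) := by
  apply index?_of_getElem?
  · rw [List.getElem?_append_left (by rw [powListA_length]; omega)]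
    rw [powListA_getElem? r (r - 1 - a) (by omega)]
    congr 2
    omega
  · intro j hj
    rw [List.getElem?_append_left (by rw [powListA_length]; omega)]
    rw [powListA_getElem? r j (by omega)]
    intro hcon
    have := Option.some.inj hcon
    have := Nat.pow_right_injective (le_refl 2) this
    omega

theorem piIdx_np (r q : Nat) (hq : q ∈ npBlocks r) :
    PySem.List.index? (powListA r ++ npBlocks r) q = some (r + (q - 2 - Nat.log2 q)) := by
  obtain ⟨hq3, hqlt, hqnp⟩ := npBlocks_mem r q hq
  apply index?_of_getElem?
  · rw [List.getElem?_append_right (by rw [powListA_length]; omega)]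
    rw [powListA_length]
    have h1 : r + (q - 2 - Nat.log2 q) - r = q - 2 - Nat.log2 q := by omega
    rw [h1]
    exact npBlocks_getElem_rank r q hq
  · intro j hj
    by_cases hjr : j < r
    · rw [List.getElem?_append_left (by rw [powListA_length]; omega)]
      rw [powListA_getElem? r j hjr]
      intro hcon
      have heq : 2 ^ (r - 1 - j) = q := Option.some.inj hcon
      have hlog : Nat.log2 q = r - 1 - j := by
        rw [← heq]
        exact log2_spec _ _ (le_refl _) (by
          have : (2:Nat) ^ (r - 1 - j + 1) = 2 ^ (r - 1 - j) + 2 ^ (r - 1 - j) := by ring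
          have h1 : 1 ≤ (2:Nat) ^ (r - 1 - j) := Nat.one_le_two_pow
          omega)
      rw [hlog] at hqnp
      omega
    · rw [List.getElem?_append_right (by rw [powListA_length]; omega)]
      rw [powListA_length]
      intro hcon
      have hrank := npBlocks_getElem_rank r q hq
      have hlt : j - r < q - 2 - Nat.log2 q := by omega
      have hlen : q - 2 - Nat.log2 q < (npBlocks r).length :=
        (List.getElem?_eq_some_iff.mp hrank).1
      have hjlen : j - r < (npBlocks r).length := by omega
      have hgj : (npBlocks r)[j - r] = q := by
        have := List.getElem?_eq_some_iff.mp hcon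
        exact this.2
      have hpw := npBlocks_pairwise r
      rw [List.pairwise_iff_getElem] at hpw
      have := hpw (j - r) (q - 2 - Nat.log2 q) hjlen hlen hlt
      rw [hgj] at this
      have hgq : (npBlocks r)[q - 2 - Nat.log2 q] = q := (List.getElem?_eq_some_iff.mp hrank).2
      rw [hgq] at this
      omega

theorem hammingGeneratorMatrix_eq (r : Nat) (h2 : 2 ≤ r) :
    hammingGeneratorMatrix r =
      (List.range (2 ^ r - r - 1)).map (fun j => (List.range' 1 (2 ^ r - 1)).map (fun p => colE r j p)) := by
  have hrlt : r < 2 ^ r := Nat.lt_two_pow_self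
  have h2r := pvTwoMulLe r
  have hK1 : 1 ≤ 2 ^ r - r - 1 := by omega
  have hKeq : 2 ^ r - 1 - r = 2 ^ r - r - 1 := by omega
  have hcnt : ∀ x : Nat, 2 ^ (x + 1) - (2 ^ x + 1) = 2 ^ x - 1 := by
    intro x
    have h : (2:Nat) ^ (x + 1) = 2 ^ x + 2 ^ x := by ring
    omega
  unfold hammingGeneratorMatrix
  simp only [PySem.List.foldl_append_singleton, PySem.List.foldl_append_singleton_eq_map,
    PySem.List.foldl_append_eq_flatMap, List.nil_append, hcnt, hKeq]
  rw [show List.map (fun i => 2 ^ (r - i - 1)) (List.range r) = powListA r from rfl]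
  rw [show List.flatMap (fun j => List.range' (2 ^ j + 1) (2 ^ j - 1)) (List.range' 1 (r - 1)) = npBlocks r from rfl]
  have hH : List.map (fun i => decimalToVector (((powListA r ++ npBlocks r).getD i 0 : Nat) : Int) r)
        (List.range' r (2 ^ r - r - 1))
      = (List.range (2 ^ r - r - 1)).map (fun t => bitsMSB (((npBlocks r).getD t 0 : Nat) : Int) r) := by
    rw [List.range'_eq_map_range, List.map_map]
    apply List.map_congr_left
    intro t ht
    rw [List.mem_range] at ht
    simp only [Function.comp]
    rw [List.getD_eq_getElem?_getD, List.getElem?_append_right (by rw [powListA_length]; omega),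
      powListA_length]
    have he : r + t - r = t := by omega
    rw [he, ← List.getD_eq_getElem?_getD, dtv_eq]
  rw [hH]
  have hzipH : pyZipStar ((List.range (2 ^ r - r - 1)).map (fun t => bitsMSB (((npBlocks r).getD t 0 : Nat) : Int) r))
      = (List.range r).map (fun t => ((List.range (2 ^ r - r - 1)).map
          (fun j => (bitsMSB (((npBlocks r).getD j 0 : Nat) : Int) r).getD t 0))) := by
    rw [zipStar_uniform _ r
      (by
        intro hcon
        have := congrArg List.length hcon
        simp at this
        omega)
      (by
        intro row hrow
        rw [List.mem_map] at hrow
        obtain ⟨t, _, hrw⟩ := hrow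
        rw [← hrw, bitsMSB_length])]
    apply List.map_congr_left
    intro t _
    rw [List.map_map]
    rfl
  rw [hzipH]
  have hbody : ∀ x ∈ List.range (2 ^ r - 1),
      ((List.range r).map (fun t => ((List.range (2 ^ r - r - 1)).map
          (fun j => (bitsMSB (((npBlocks r).getD j 0 : Nat) : Int) r).getD t 0)))
        ++ (List.range (2 ^ r - r - 1)).map
            (fun i => decimalToVector ((2 ^ (2 ^ r - r - 1 - i - 1) : Nat) : Int) (2 ^ r - r - 1))).getD
        (((List.range (2 ^ r - 1)).map
            (fun i => (PySem.List.index? (powListA r ++ npBlocks r) (i + 1)).getD 0)).getD x 0) []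
      = (List.range (2 ^ r - r - 1)).map (fun j => colE r j (x + 1)) := by
    intro x hx
    rw [List.mem_range] at hx
    rw [PySem.List.getD_map_range _ _ _ _ hx]
    have hp1 : x + 1 < 2 ^ r := by omega
    by_cases hp : x + 1 = 2 ^ Nat.log2 (x + 1)
    · -- parity position
      have ha : Nat.log2 (x + 1) < r := log2_lt r (x + 1) (by omega) hp1
      rw [show (PySem.List.index? (powListA r ++ npBlocks r) (x + 1)) =
            some (r - 1 - Nat.log2 (x + 1)) from by
          conv_lhs => rw [hp]
          exact piIdx_pow r _ ha]
      simp only [Option.getD_some]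
      rw [List.getD_eq_getElem?_getD,
        List.getElem?_append_left (by simp only [List.length_map, List.length_range]; omega)]
      rw [List.getElem?_map, List.getElem?_range (by omega)]
      simp only [Option.map_some, Option.getD_some]
      apply List.map_congr_left
      intro j hj
      rw [List.mem_range] at hj
      have hmem : (npBlocks r).getD j 0 ∈ npBlocks r := by
        rw [List.getD_eq_getElem?_getD]
        have hjl : j < (npBlocks r).length := by rw [npBlocks_length]; omega
        rw [List.getElem?_eq_getElem hjl]
        exact List.getElem_mem hjl
      obtain ⟨hge3, hlt, _⟩ := npBlocks_mem r _ hmem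
      rw [bits_getD r _ _ hlt (by omega)]
      have he : r - 1 - (r - 1 - Nat.log2 (x + 1)) = Nat.log2 (x + 1) := by omega
      rw [he]
      unfold colE
      rw [if_pos hp]
    · -- message position
      have hq : x + 1 ∈ npBlocks r := npBlocks_mem_of r (x + 1) (by omega) hp1 hp
      rw [piIdx_np r (x + 1) hq]
      simp only [Option.getD_some]
      have hrk : x + 1 - 2 - Nat.log2 (x + 1) < 2 ^ r - r - 1 := rank_lt r (x + 1) hq
      rw [List.getD_eq_getElem?_getD,
        List.getElem?_append_right (by simp only [List.length_map, List.length_range]; omega)]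
      simp only [List.length_map, List.length_range]
      have he : r + (x + 1 - 2 - Nat.log2 (x + 1)) - r = x + 1 - 2 - Nat.log2 (x + 1) := by omega
      rw [he, List.getElem?_map, List.getElem?_range hrk]
      simp only [Option.map_some, Option.getD_some]
      rw [dtv_eq]
      apply List.ext_getElem
      · rw [bitsMSB_length]; simp
      · intro j hj1 hj2
        have hjK : j < 2 ^ r - r - 1 := by rw [bitsMSB_length] at hj1; exact hj1
        have hqlt : (2 : Nat) ^ (2 ^ r - r - 1 - (x + 1 - 2 - Nat.log2 (x + 1)) - 1) < 2 ^ (2 ^ r - r - 1) :=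
          Nat.pow_lt_pow_right (by norm_num) (by omega)
        have hbg := bits_getD (2 ^ r - r - 1)
          (2 ^ (2 ^ r - r - 1 - (x + 1 - 2 - Nat.log2 (x + 1)) - 1)) j hqlt hjK
        rw [List.getD_eq_getElem?_getD, List.getElem?_eq_getElem hj1, Option.getD_some] at hbg
        rw [hbg]
        simp only [List.getElem_map, List.getElem_range]
        rw [Nat.testBit_two_pow]
        unfold colE
        rw [if_neg hp]
        simp only [decide_eq_true_eq]
        split_ifs <;> omega
  rw [List.map_congr_left hbody]
  rw [zipStar_uniform _ (2 ^ r - r - 1)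
    (by
      intro hcon
      have := congrArg List.length hcon
      simp at this
      omega)
    (by
      intro row hrow
      rw [List.mem_map] at hrow
      obtain ⟨t, _, hrw⟩ := hrow
      rw [← hrw]
      simp)]
  apply List.map_congr_left
  intro t ht
  rw [List.mem_range] at ht
  rw [List.map_map, List.range'_eq_map_range, List.map_map]
  apply List.map_congr_left
  intro x hx
  rw [List.mem_range] at hx
  simp only [Function.comp]
  rw [PySem.List.getD_map_range _ _ _ _ ht]
  rw [Nat.add_comm 1 x]

-- ---- B-side characterization ----

theorem guard_eq (q a : Nat) : (q >>> a &&& 1 ≠ 0) = (Nat.testBit q a = true) := by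
  simp [Nat.testBit, Nat.and_comm]

theorem posFold_tail (l : List Nat) : ∀ (acc : List Nat) (a : Nat), (∀ p ∈ l, p < 2 ^ a) →
    l.foldl (fun (st : List Nat × Nat) p =>
        if p = 1 <<< st.2 then (st.1, st.2 + 1) else (st.1 ++ [p], st.2)) (acc, a)
      = (acc ++ l, a) := by
  induction l with
  | nil => intro acc a _; simp
  | cons p l ih =>
    intro acc a hb
    have hp : p < 2 ^ a := hb p (List.mem_cons_self)
    simp only [List.foldl_cons]
    rw [if_neg (by rw [Nat.one_shiftLeft]; omega)]
    rw [ih (acc ++ [p]) a (fun x hx => hb x (List.mem_cons_of_mem _ hx))]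
    simp

theorem posFold_eq (r : Nat) :
    (List.range' 1 (2 ^ r - 1)).foldl
      (fun (st : List Nat × Nat) p => if p = 1 <<< st.2 then (st.1, st.2 + 1) else (st.1 ++ [p], st.2))
      ([], 0) = (npBlocks r, r) := by
  induction r with
  | zero => simp [npBlocks]
  | succ n ih =>
    by_cases hn1 : 1 ≤ n
    · have h1 : 1 ≤ 2 ^ n := Nat.one_le_two_pow
      have h2 : 2 ^ (n + 1) = 2 ^ n + 2 ^ n := by ring
      have h6 := List.range'_succ (s := 2 ^ n) (n := 2 ^ n - 1) (step := 1)
      rw [Nat.sub_add_cancel h1] at h6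
      have hsplit : List.range' 1 (2 ^ (n + 1) - 1)
          = List.range' 1 (2 ^ n - 1) ++ (2 ^ n) :: List.range' (2 ^ n + 1) (2 ^ n - 1) := by
        have e : List.range' 1 (2 ^ n - 1) ++ List.range' (1 + 1 * (2 ^ n - 1)) (2 ^ n) 1
            = List.range' 1 ((2 ^ n - 1) + 2 ^ n) := List.range'_append
        have h3 : 1 + 1 * (2 ^ n - 1) = 2 ^ n := by omega
        have h4 : (2 ^ n - 1) + 2 ^ n = 2 ^ (n + 1) - 1 := by omega
        rw [h3, h4] at e
        rw [← e, h6]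
      rw [hsplit, List.foldl_append, ih, List.foldl_cons]
      rw [if_pos (by rw [Nat.one_shiftLeft])]
      rw [posFold_tail (List.range' (2 ^ n + 1) (2 ^ n - 1)) (npBlocks n) (n + 1) (by
        intro p hp
        rw [List.mem_range'_1] at hp
        omega)]
      rw [npBlocks_succ n hn1]
    · have hn0 : n = 0 := by omega
      subst hn0
      simp [npBlocks]

theorem bFold_eq (r : Nat) (m : List Int) (hk : m.length = 2 ^ r - r - 1) :
    (List.range' 1 (2 ^ r - 1)).foldl
      (fun (st : List Int × Nat) p =>
        if p = 1 <<< st.2 then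
          let t := (List.range m.length).foldl
            (fun t j =>
              if ((npBlocks r).getD j 0) >>> st.2 &&& 1 ≠ 0 then
                let t := t + m.getD j 0
                if t > 1 then 0 else t
              else t) 0
          (st.1 ++ [t], st.2 + 1)
        else
          let t := m.getD (p - 1 - st.2) 0
          (st.1 ++ [if t > 1 then 0 else t], st.2)) ([], 0) = (outSpec r m, r) := by
  have hparity : ∀ (a : Nat),
      (List.range m.length).foldl
        (fun t j =>
          if ((npBlocks r).getD j 0) >>> a &&& 1 ≠ 0 then
            let t := t + m.getD j 0
            if t > 1 then 0 else t
          else t) 0 = parityV r m a := by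
    intro a
    unfold parityV
    rw [hk]
    simp only [guard_eq]
    rfl
  have hcvpow : ∀ (a : Nat), colval r m (2 ^ a) = parityV r m a := by
    intro a
    have hlogp : Nat.log2 (2 ^ a) = a := log2_spec a (2 ^ a) (le_refl _) (by
      have : 2 ^ (a + 1) = 2 ^ a + 2 ^ a := by ring
      have h1 : 1 ≤ 2 ^ a := Nat.one_le_two_pow
      omega)
    unfold colval
    rw [hlogp, if_pos rfl]
  have htail : ∀ (l : List Nat) (out : List Int) (a : Nat), 1 ≤ a →
      (∀ p ∈ l, 2 ^ (a - 1) < p ∧ p < 2 ^ a) →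
      l.foldl
        (fun (st : List Int × Nat) p =>
          if p = 1 <<< st.2 then
            let t := (List.range m.length).foldl
              (fun t j =>
                if ((npBlocks r).getD j 0) >>> st.2 &&& 1 ≠ 0 then
                  let t := t + m.getD j 0
                  if t > 1 then 0 else t
                else t) 0
            (st.1 ++ [t], st.2 + 1)
          else
            let t := m.getD (p - 1 - st.2) 0
            (st.1 ++ [if t > 1 then 0 else t], st.2)) (out, a)
        = (out ++ l.map (colval r m), a) := by
    intro l
    induction l with
    | nil => intro out a _ _; simp
    | cons p l ih =>
      intro out a ha hb
      obtain ⟨hp1, hp2⟩ := hb p (List.mem_cons_self)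
      simp only [List.foldl_cons]
      rw [if_neg (by rw [Nat.one_shiftLeft]; omega)]
      rw [ih (out ++ [_]) a ha (fun x hx => hb x (List.mem_cons_of_mem _ hx))]
      have hlog : Nat.log2 p = a - 1 := by
        apply log2_spec
        · omega
        · have : a - 1 + 1 = a := by omega
          rw [this]; exact hp2
      have hcv : colval r m p = clampI (m.getD (p - 1 - a) 0) := by
        unfold colval
        rw [hlog, if_neg (by omega)]
        congr 2
        omega
      have hval : (if m.getD (p - 1 - a) 0 > 1 then (0 : Int) else m.getD (p - 1 - a) 0)
          = colval r m p := by rw [hcv]; rfl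
      rw [hval]
      simp
  have hmain : ∀ (s : Nat),
      (List.range' 1 (2 ^ s - 1)).foldl
        (fun (st : List Int × Nat) p =>
          if p = 1 <<< st.2 then
            let t := (List.range m.length).foldl
              (fun t j =>
                if ((npBlocks r).getD j 0) >>> st.2 &&& 1 ≠ 0 then
                  let t := t + m.getD j 0
                  if t > 1 then 0 else t
                else t) 0
            (st.1 ++ [t], st.2 + 1)
          else
            let t := m.getD (p - 1 - st.2) 0
            (st.1 ++ [if t > 1 then 0 else t], st.2)) ([], 0)
        = ((List.range' 1 (2 ^ s - 1)).map (colval r m), s) := by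
    intro s
    induction s with
    | zero => simp
    | succ n ih =>
      by_cases hn1 : 1 ≤ n
      · have h1 : 1 ≤ 2 ^ n := Nat.one_le_two_pow
        have h2 : 2 ^ (n + 1) = 2 ^ n + 2 ^ n := by ring
        have h6 := List.range'_succ (s := 2 ^ n) (n := 2 ^ n - 1) (step := 1)
        rw [Nat.sub_add_cancel h1] at h6
        have hsplit : List.range' 1 (2 ^ (n + 1) - 1)
            = List.range' 1 (2 ^ n - 1) ++ (2 ^ n) :: List.range' (2 ^ n + 1) (2 ^ n - 1) := by
          have e : List.range' 1 (2 ^ n - 1) ++ List.range' (1 + 1 * (2 ^ n - 1)) (2 ^ n) 1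
              = List.range' 1 ((2 ^ n - 1) + 2 ^ n) := List.range'_append
          have h3 : 1 + 1 * (2 ^ n - 1) = 2 ^ n := by omega
          have h4 : (2 ^ n - 1) + 2 ^ n = 2 ^ (n + 1) - 1 := by omega
          rw [h3, h4] at e
          rw [← e, h6]
        rw [hsplit, List.foldl_append, ih, List.foldl_cons]
        rw [if_pos (by rw [Nat.one_shiftLeft])]
        rw [hparity n]
        rw [htail (List.range' (2 ^ n + 1) (2 ^ n - 1))
            ((List.range' 1 (2 ^ n - 1)).map (colval r m) ++ [parityV r m n]) (n + 1)
            (by omega)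
            (by intro p hp; rw [List.mem_range'_1] at hp; simp only [Nat.add_sub_cancel]; constructor <;> omega)]
        rw [List.map_append, List.map_cons]
        rw [hcvpow n]
        simp
      · have hn0 : n = 0 := by omega
        subst hn0
        have h1 : List.range' 1 (2 ^ 1 - 1) = [1] := by decide
        rw [h1]
        simp only [List.foldl_cons, List.foldl_nil, List.map_cons, List.map_nil]
        rw [if_pos (by rw [Nat.one_shiftLeft])]
        rw [hparity 0]
        have hcv1 : colval r m 1 = parityV r m 0 := by
          have h0 := hcvpow 0
          norm_num at h0
          exact h0
        rw [hcv1]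
        simp
  exact hmain r

-- ---- assembly ----

theorem a_main (m : List Int) (r : Nat) (h2 : 2 ≤ r) (hk : 2 ^ r - r - 1 = m.length) :
    (let G := hammingGeneratorMatrix r
     ((List.range (G.getD 0 []).length).foldl
      (fun (st : List Int × Nat) i =>
        let total := (List.range G.length).foldl
          (fun t j =>
            let t := t + m.getD j 0 * ((G.getD j []).getD i 0)
            if t > 1 then 0 else t) 0
        (st.1.set st.2 total, st.2 + 1))
      (List.replicate (G.getD 0 []).length 0, 0)).1) = outSpec r m := by
  have hrlt : r < 2 ^ r := Nat.lt_two_pow_self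
  have h2r := pvTwoMulLe r
  have hK1 : 1 ≤ 2 ^ r - r - 1 := by omega
  simp only [hammingGeneratorMatrix_eq r h2]
  rw [PySem.List.getD_map_range _ _ _ _ (by omega)]
  simp only [List.length_map, List.length_range, List.length_range']
  have hsm := setfold_map
    (fun i => (List.range (2 ^ r - r - 1)).foldl
      (fun t j =>
        let t := t + m.getD j 0 *
          (((List.range (2 ^ r - r - 1)).map
              (fun j => (List.range' 1 (2 ^ r - 1)).map (fun p => colE r j p))).getD j []).getD i 0
        if t > 1 then 0 else t) 0)
    (2 ^ r - 1) 0 [] (List.replicate (2 ^ r - 1) 0) (by simp)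
  simp only [List.nil_append, List.length_nil, ← List.range_eq_range'] at hsm
  rw [hsm]
  unfold outSpec
  rw [List.range'_eq_map_range, List.map_map]
  apply List.map_congr_left
  intro i hi
  rw [List.mem_range] at hi
  simp only [Function.comp]
  have hp1 : 1 + i < 2 ^ r := by omega
  by_cases hp : 1 + i = 2 ^ Nat.log2 (1 + i)
  · -- parity column
    rw [PySem.List.foldl_congr_mem _ _
      (fun t j => clampI (t + m.getD j 0 *
        (if Nat.testBit ((npBlocks r).getD j 0) (Nat.log2 (1 + i)) then 1 else 0))) 0
      (by
        intro acc j hj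
        rw [List.mem_range] at hj
        rw [PySem.List.getD_map_range _ _ _ _ hj]
        rw [List.map_map]
        rw [PySem.List.getD_map_range _ _ _ _ hi]
        simp only [Function.comp]
        unfold colE
        rw [if_pos hp]
        rfl)]
    rw [fold_indicator _ _ _ 0 (by omega)]
    unfold colval
    rw [if_pos hp]
    rfl
  · -- message column
    have hq : 1 + i ∈ npBlocks r := npBlocks_mem_of r (1 + i) (by omega) hp1 hp
    rw [PySem.List.foldl_congr_mem _ _
      (fun t j => clampI (t + m.getD j 0 *
        (if 1 + i - 2 - Nat.log2 (1 + i) = j then 1 else 0))) 0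
      (by
        intro acc j hj
        rw [List.mem_range] at hj
        rw [PySem.List.getD_map_range _ _ _ _ hj]
        rw [List.map_map]
        rw [PySem.List.getD_map_range _ _ _ _ hi]
        simp only [Function.comp]
        unfold colE
        rw [if_neg hp]
        rfl)]
    rw [fold_unit (2 ^ r - r - 1) _ _ (rank_lt r (1 + i) hq)]
    unfold colval
    rw [if_neg hp]

-- ===== VERDICT (by name: the statement is the Claim_ definition above) =====
theorem hammingEncoder_spec : Claim_equal_hammingEncoder := by
  intro m _
  unfold Spec_hammingEncoder
  simp only [hammingEncoder, hammingEncoder_alt, findR_eq]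
  by_cases h : 2 ^ findR_A m.length 2 - findR_A m.length 2 - 1 = m.length
  · simp only [h, if_pos]
    rw [posFold_eq, bFold_eq _ _ h.symm]
    have := a_main m (findR_A m.length 2) (findR_ge m.length 2) h
    simpa using this
  · simp only [h, ite_false]
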